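-- pv_equiv track=rewrite | github.com/khanhlinh-jnf/Hashiwokakero | src/helper.py | getBridgeConnection
-- ===== SOURCE A (Python) =====
-- def getBridgeConnection(islands, connections):
--     map = {}
--     for island in islands:
--         for connection in connections:
--             if island in connection:
--                 if island not in map:
--                     map[island] = []
--                 map[island].append(connection)
--
--     return map
-- ===== SOURCE B (Python) =====
-- def getBridgeConnection(islands, connections):
--     # One pass over connections builds an endpoint index; then reassemble per islands order.
--     idx = {}
--     for c in connections:
--         idx.setdefault(c[0], []).append(c)
--         if c[1] != c[0]:
--             idx.setdefault(c[1], []).append(c)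
--     result = {}
--     for island in islands:
--         lst = idx.get(island)
--         if lst:
--             result.setdefault(island, []).extend(lst)
--     return result
-- ===== Notes on version B (the rewrite author's own statement) =====
-- stated objective: faster
-- what changed: Instead of scanning all connections once per island (O(I*C)), B makes a single pass over connections building an endpoint-to-connections index, then reassembles the result in islands order with O(1) lookups (O(I+C)).
import Mathlib
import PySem

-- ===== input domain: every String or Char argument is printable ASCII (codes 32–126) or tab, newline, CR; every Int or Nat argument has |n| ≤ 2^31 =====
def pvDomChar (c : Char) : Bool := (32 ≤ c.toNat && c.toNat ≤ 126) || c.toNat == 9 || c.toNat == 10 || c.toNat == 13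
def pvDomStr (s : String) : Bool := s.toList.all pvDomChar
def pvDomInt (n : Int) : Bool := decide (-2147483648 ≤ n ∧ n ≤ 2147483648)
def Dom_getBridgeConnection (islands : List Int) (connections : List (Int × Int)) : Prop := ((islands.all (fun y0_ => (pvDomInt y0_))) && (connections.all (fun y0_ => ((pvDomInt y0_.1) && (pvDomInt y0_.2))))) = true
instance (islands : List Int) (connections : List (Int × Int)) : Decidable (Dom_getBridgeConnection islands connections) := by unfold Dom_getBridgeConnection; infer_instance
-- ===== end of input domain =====

-- B replaces A's per-island scan of all connections by one pass over connections
-- building an endpoint index, then reassembles in islands order (faster in a timing run).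


-- ===== PORT A =====
def getBridgeConnection (islands : List Int) (connections : List (Int × Int)) : List (Int × List (Int × Int)) :=
  (islands.foldl (fun map island =>
      connections.foldl (fun map connection =>
        if island = connection.1 ∨ island = connection.2 then
          -- 'if island not in map: map[island] = []' then 'map[island].append(connection)'
          (if map.contains island then map else map.insert island ([] : List (Int × Int))).modify
            island [] (fun l => l ++ [connection])
        else map) map)
    PySem.Dict.empty).items

-- ===== PORT B =====
def getBridgeConnection_alt (islands : List Int) (connections : List (Int × Int)) : List (Int × List (Int × Int)) :=
  -- 'idx.setdefault(k, []).append(c)' / '.extend(lst)' are ported as Dict.modify k [] (· ++ …) (exact)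
  let idx : PySem.Dict Int (List (Int × Int)) := connections.foldl (fun d c =>
      let d1 := d.modify c.1 [] (fun l => l ++ [c])
      if c.2 ≠ c.1 then d1.modify c.2 [] (fun l => l ++ [c]) else d1)
    PySem.Dict.empty
  (islands.foldl (fun result island =>
      match idx.get? island with   -- 'lst = idx.get(island); if lst:' (truthy = some nonempty list)
      | some lst => if lst ≠ [] then result.modify island [] (fun l => l ++ lst) else result
      | none => result)
    PySem.Dict.empty).items

-- ===== PRECONDITION & SPEC =====
def Spec_getBridgeConnection (islands : List Int) (connections : List (Int × Int)) (out : List (Int × List (Int × Int))) : Prop := out = getBridgeConnection_alt islands connections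
instance (islands : List Int) (connections : List (Int × Int)) (out : List (Int × List (Int × Int))) : Decidable (Spec_getBridgeConnection islands connections out) := by unfold Spec_getBridgeConnection; infer_instance

-- ===== CLAIM (what is proved, stated in full; the proofs are below) =====
def Claim_equal_getBridgeConnection : Prop := ∀ (islands : List Int) (connections : List (Int × Int)), Dom_getBridgeConnection islands connections → Spec_getBridgeConnection islands connections (getBridgeConnection islands connections)

-- ===== LEMMAS AND PROOFS =====

-- the connections containing island i, in connections order (proof-side helper)
def pvFilt (i : Int) (cs : List (Int × Int)) : List (Int × Int) :=
  cs.filter (fun c => i == c.1 || i == c.2)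

-- the common per-island step both programs implement
def pvStep (cs : List (Int × Int)) (m : PySem.Dict Int (List (Int × Int))) (i : Int) :
    PySem.Dict Int (List (Int × Int)) :=
  if pvFilt i cs = [] then m else m.modify i [] (fun l => l ++ pvFilt i cs)

theorem pv_modify_modify {κ ν : Type} [BEq κ] [LawfulBEq κ] (d : PySem.Dict κ ν) (k : κ)
    (d0 : ν) (f g : ν → ν) :
    (d.modify k d0 f).modify k d0 g = d.modify k d0 (fun x => g (f x)) := by
  simp [PySem.Dict.modify, PySem.Dict.getD_insert_self, PySem.Dict.insert_insert_self]

theorem pv_guard_modify {κ ν : Type} [BEq κ] [LawfulBEq κ] (d : PySem.Dict κ ν) (k : κ)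
    (d0 : ν) (f : ν → ν) :
    (if d.contains k then d else d.insert k d0).modify k d0 f = d.modify k d0 f := by
  by_cases h : d.contains k = true
  · simp [h]
  · have h' : d.contains k = false := by simpa using h
    simp [h', PySem.Dict.modify, PySem.Dict.getD_insert_self,
      PySem.Dict.insert_insert_self, PySem.Dict.getD_of_not_contains]

theorem pvFilt_cons_pos (i : Int) (c : Int × Int) (cs : List (Int × Int))
    (h : i = c.1 ∨ i = c.2) : pvFilt i (c :: cs) = c :: pvFilt i cs := by
  rcases h with h | h <;> simp [pvFilt, h]

theorem pvFilt_cons_neg (i : Int) (c : Int × Int) (cs : List (Int × Int))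
    (h : ¬ (i = c.1 ∨ i = c.2)) : pvFilt i (c :: cs) = pvFilt i cs := by
  push Not at h
  simp [pvFilt, h.1, h.2]

-- A's inner loop over connections is the common step
theorem pv_innerA (i : Int) (cs : List (Int × Int)) (m : PySem.Dict Int (List (Int × Int))) :
    cs.foldl (fun map c =>
        if i = c.1 ∨ i = c.2 then
          (if map.contains i then map else map.insert i ([] : List (Int × Int))).modify
            i [] (fun l => l ++ [c])
        else map) m
      = pvStep cs m i := by
  induction cs generalizing m with
  | nil => simp [pvStep, pvFilt]
  | cons c rest ih =>
    simp only [List.foldl_cons]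
    by_cases hc : i = c.1 ∨ i = c.2
    · rw [if_pos hc, pv_guard_modify, ih]
      unfold pvStep
      rw [pvFilt_cons_pos i c rest hc]
      by_cases hr : pvFilt i rest = []
      · simp [hr]
      · simp only [hr, reduceCtorEq, if_false, pv_modify_modify]
        simp
    · rw [if_neg hc, ih]
      unfold pvStep
      rw [pvFilt_cons_neg i c rest hc]

-- B's index fold: lookup at i yields exactly the connections containing i
theorem pv_idxB (cs : List (Int × Int)) (d : PySem.Dict Int (List (Int × Int))) (i : Int) :
    (cs.foldl (fun d c =>
        let d1 := d.modify c.1 [] (fun l => l ++ [c])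
        if c.2 ≠ c.1 then d1.modify c.2 [] (fun l => l ++ [c]) else d1) d).getD i []
      = d.getD i [] ++ pvFilt i cs := by
  induction cs generalizing d with
  | nil => simp [pvFilt]
  | cons c rest ih =>
    simp only [List.foldl_cons]
    rw [ih]
    by_cases hcc : c.2 = c.1 <;> by_cases h1 : i = c.1 <;> by_cases h2 : i = c.2 <;>
      simp [hcc, h1, h2, PySem.Dict.getD_modify, pvFilt] <;>
      simp_all [pvFilt]

-- B's reassembly step is the common step
theorem pv_stepR (cs : List (Int × Int)) (i : Int)
    (r : PySem.Dict Int (List (Int × Int))) :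
    (match (cs.foldl (fun d c =>
        let d1 := d.modify c.1 [] (fun l => l ++ [c])
        if c.2 ≠ c.1 then d1.modify c.2 [] (fun l => l ++ [c]) else d1)
        (PySem.Dict.empty : PySem.Dict Int (List (Int × Int)))).get? i with
      | some lst => if lst ≠ [] then r.modify i [] (fun l => l ++ lst) else r
      | none => r)
      = pvStep cs r i := by
  have hidx : (cs.foldl (fun d c =>
      let d1 := d.modify c.1 [] (fun l => l ++ [c])
      if c.2 ≠ c.1 then d1.modify c.2 [] (fun l => l ++ [c]) else d1)
      (PySem.Dict.empty : PySem.Dict Int (List (Int × Int)))).getD i [] = pvFilt i cs := by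
    rw [pv_idxB]; simp
  cases hg : (cs.foldl (fun d c =>
      let d1 := d.modify c.1 [] (fun l => l ++ [c])
      if c.2 ≠ c.1 then d1.modify c.2 [] (fun l => l ++ [c]) else d1)
      (PySem.Dict.empty : PySem.Dict Int (List (Int × Int)))).get? i with
  | none =>
    have : pvFilt i cs = [] := by
      rw [← hidx, PySem.Dict.getD_eq_get?_getD, hg]; rfl
    simp [pvStep, this]
  | some l =>
    have hl : l = pvFilt i cs := by
      rw [← hidx, PySem.Dict.getD_eq_get?_getD, hg]; rfl
    by_cases he : l = []
    · simp [pvStep, he, ← hl]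
    · simp [pvStep, he, ← hl]


-- ===== VERDICT (by name: the statement is the Claim_ definition above) =====
theorem getBridgeConnection_spec : Claim_equal_getBridgeConnection := by
  intro islands connections _
  unfold Spec_getBridgeConnection getBridgeConnection getBridgeConnection_alt
  have hA : (fun (map : PySem.Dict Int (List (Int × Int))) island =>
      connections.foldl (fun map c =>
        if island = c.1 ∨ island = c.2 then
          (if map.contains island then map else map.insert island ([] : List (Int × Int))).modify
            island [] (fun l => l ++ [c])
        else map) map)
      = pvStep connections := funext fun m => funext fun i => pv_innerA i connections m
  have hB : (fun (result : PySem.Dict Int (List (Int × Int))) island =>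
      match (connections.foldl (fun d c =>
          let d1 := d.modify c.1 [] (fun l => l ++ [c])
          if c.2 ≠ c.1 then d1.modify c.2 [] (fun l => l ++ [c]) else d1)
          (PySem.Dict.empty : PySem.Dict Int (List (Int × Int)))).get? island with
        | some lst => if lst ≠ [] then result.modify island [] (fun l => l ++ lst) else result
        | none => result)
      = pvStep connections := funext fun r => funext fun i => pv_stepR connections i r
  simp only [hA, hB]
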